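-- pv_equiv track=rewrite | github.com/caariasi/Musk-mod-0 | prueba de subida.py | _comprobar_asistencia
-- ===== SOURCE A (Python) =====
-- def _comprobar_asistencia(asistencia):
--     resultados = {}
--
--     for mes, numero_asistencias in asistencia.items():
--         if numero_asistencias < 4:
--             resultados[mes] = 1
--         elif 4 <= numero_asistencias < 8:
--             resultados[mes] = 2
--         else:
--             resultados[mes] = 3
--     return resultados
-- ===== SOURCE B (Python) =====
-- def _comprobar_asistencia(asistencia):
--     # tier = position of the count in a sorted threshold table, found by binary search
--     limites = [4, 8]
--
--     def bisect_right(a, x):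
--         lo, hi = 0, len(a)
--         while lo < hi:
--             mid = (lo + hi) // 2
--             if x < a[mid]:
--                 hi = mid
--             else:
--                 lo = mid + 1
--         return lo
--
--     return {mes: bisect_right(limites, n) + 1 for mes, n in asistencia.items()}
-- ===== Notes on version B (the rewrite author's own statement) =====
-- stated objective: alternative
-- what changed: Replaces the if/elif/else threshold chain by a binary search (hand-written bisect_right) over a sorted threshold table [4, 8], the tier being the insertion position plus one.
import Mathlib
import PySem

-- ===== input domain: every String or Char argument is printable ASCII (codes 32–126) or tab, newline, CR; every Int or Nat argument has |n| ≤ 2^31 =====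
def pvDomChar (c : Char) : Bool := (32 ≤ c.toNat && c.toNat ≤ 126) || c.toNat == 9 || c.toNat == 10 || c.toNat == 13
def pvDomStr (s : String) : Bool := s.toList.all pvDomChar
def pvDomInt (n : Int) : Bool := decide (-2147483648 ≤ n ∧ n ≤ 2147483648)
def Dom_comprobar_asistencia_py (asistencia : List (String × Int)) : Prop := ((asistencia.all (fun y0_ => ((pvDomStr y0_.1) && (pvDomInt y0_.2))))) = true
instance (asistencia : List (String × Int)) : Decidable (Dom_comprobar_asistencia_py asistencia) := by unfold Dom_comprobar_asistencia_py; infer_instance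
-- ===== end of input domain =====

-- B replaces the if/elif/else threshold chain by a binary search (bisect_right) over the sorted threshold table [4, 8]; same cost, alternative algorithm.

-- ===== PORT A =====
-- the for-loop over asistencia.items(), carrying the dict `resultados`
def pvLoopA : List (String × Int) → PySem.Dict String Int → PySem.Dict String Int
  | [], resultados => resultados
  | (mes, numero_asistencias) :: rest, resultados =>
      pvLoopA rest
        (if numero_asistencias < 4 then resultados.insert mes 1
         else if 4 ≤ numero_asistencias ∧ numero_asistencias < 8 then resultados.insert mes 2
         else resultados.insert mes 3)

def comprobar_asistencia_py (asistencia : List (String × Int)) : List (String × Int) :=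
  (pvLoopA asistencia PySem.Dict.empty).items

-- ===== PORT B =====
-- the while-loop of Source B's hand-written bisect_right (lo, hi bounds; a[mid] is always
-- in range since 0 ≤ lo ≤ mid < hi ≤ len a, so List.getD is exact here)
def pvBisectLoop (a : List Int) (x : Int) (lo hi : Nat) : Nat :=
  if lo < hi then
    let mid := (lo + hi) / 2
    if x < a.getD mid 0 then pvBisectLoop a x lo mid
    else pvBisectLoop a x (mid + 1) hi
  else lo
termination_by hi - lo
decreasing_by all_goals omega

def pvBisectRight (a : List Int) (x : Int) : Nat := pvBisectLoop a x 0 a.length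

-- the dict comprehension {mes: bisect_right(limites, n) + 1 …}
def comprobar_asistencia_py_alt (asistencia : List (String × Int)) : List (String × Int) :=
  let limites : List Int := [4, 8]
  (asistencia.foldl
    (fun d p => d.insert p.1 ((pvBisectRight limites p.2 : Int) + 1))
    PySem.Dict.empty).items

-- ===== PRECONDITION & SPEC =====
def Spec_comprobar_asistencia_py (asistencia : List (String × Int)) (out : List (String × Int)) : Prop := out = comprobar_asistencia_py_alt asistencia
instance (asistencia : List (String × Int)) (out : List (String × Int)) : Decidable (Spec_comprobar_asistencia_py asistencia out) := by unfold Spec_comprobar_asistencia_py; infer_instance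

-- ===== CLAIM =====
def Claim_equal_comprobar_asistencia_py : Prop := ∀ (asistencia : List (String × Int)), Dom_comprobar_asistencia_py asistencia → Spec_comprobar_asistencia_py asistencia (comprobar_asistencia_py asistencia)

-- ===== LEMMAS AND PROOFS =====
-- the binary search over [4, 8] yields 0 / 1 / 2 exactly at A's thresholds
theorem pvBisectRight_limites (x : Int) :
    pvBisectRight [4, 8] x = if x < 4 then 0 else if x < 8 then 1 else 2 := by
  unfold pvBisectRight
  rw [pvBisectLoop]; simp only [List.length_cons, List.length_nil]
  norm_num
  by_cases h8 : x < 8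
  · simp [h8]
    rw [pvBisectLoop]; norm_num
    by_cases h4 : x < 4
    · simp [h4]; rw [pvBisectLoop]; simp
    · simp [h4]; rw [pvBisectLoop]; simp
  · simp [h8]; rw [pvBisectLoop]; simp; omega

-- each loop step of A inserts the same key/value as B's per-element binary search
theorem pvLoopA_eq_foldl (xs : List (String × Int)) (d : PySem.Dict String Int) :
    pvLoopA xs d =
      xs.foldl
        (fun d p => d.insert p.1 ((pvBisectRight [4, 8] p.2 : Int) + 1))
        d := by
  induction xs generalizing d with
  | nil => rfl
  | cons p rest ih =>
      obtain ⟨mes, n⟩ := p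
      rw [pvLoopA, List.foldl_cons, ih]
      congr 1
      rw [pvBisectRight_limites]
      split_ifs <;> first | rfl | (exfalso; omega)

-- ===== VERDICT =====
theorem comprobar_asistencia_py_spec : Claim_equal_comprobar_asistencia_py := by
  intro asistencia _
  unfold Spec_comprobar_asistencia_py comprobar_asistencia_py comprobar_asistencia_py_alt
  rw [pvLoopA_eq_foldl]
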